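-- pv_equiv track=rewrite | github.com/leaatimberini/gretacore-v3 | tools/benchmarks/analyze_b3_37_acceptance.py | top1_ids
-- ===== SOURCE A (Python) =====
-- from typing import Dict, List
--
-- def top1_ids(dec: Dict[int, Dict], max_step: int) -> List[int]:
--     ids = []
--     for s in range(1, max_step + 1):
--         r = dec.get(s)
--         if r is None:
--             continue
--         ids.append(int(r.get("top1_id", -1)))
--     return ids
-- ===== SOURCE B (Python) =====
-- def top1_ids(dec, max_step):
--     return [int(r.get("top1_id", -1))
--             for s, r in sorted(dec.items(), key=lambda kv: kv[0])
--             if 1 <= s <= max_step]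
-- ===== Notes on version B (the rewrite author's own statement) =====
-- stated objective: alternative
-- what changed: Instead of scanning every step s in range(1, max_step+1) and probing the dict, B sorts the dict's items once and emits top1_id for the keys that fall inside [1, max_step]; cost depends on the number of entries rather than on max_step, trading the range scan for a sort.
import Mathlib
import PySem

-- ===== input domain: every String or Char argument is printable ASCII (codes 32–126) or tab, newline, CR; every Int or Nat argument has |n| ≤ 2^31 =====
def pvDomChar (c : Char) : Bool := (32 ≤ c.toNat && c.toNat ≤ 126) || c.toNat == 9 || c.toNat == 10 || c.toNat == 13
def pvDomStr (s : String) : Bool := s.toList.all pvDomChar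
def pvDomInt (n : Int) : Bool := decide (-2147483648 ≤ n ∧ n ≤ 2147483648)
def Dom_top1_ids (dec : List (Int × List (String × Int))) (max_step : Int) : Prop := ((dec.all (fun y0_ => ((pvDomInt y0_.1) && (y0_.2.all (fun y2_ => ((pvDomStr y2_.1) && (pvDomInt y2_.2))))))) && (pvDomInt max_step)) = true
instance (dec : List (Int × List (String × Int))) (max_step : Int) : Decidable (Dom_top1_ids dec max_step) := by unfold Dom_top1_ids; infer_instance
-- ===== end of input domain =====

-- Alternative: B replaces A's scan of every step in range(1, max_step+1) with one sort of the
-- dict's items, keeping the keys inside [1, max_step].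

-- ===== PORT A =====
-- 'for s in range(1, max_step+1): r = dec.get(s); if r is None: continue; ids.append(int(r.get("top1_id", -1)))'
-- (int(x) on an int is the identity; dict.get is first-match lookup in the association list)
def top1_ids (dec : List (Int × List (String × Int))) (max_step : Int) : List Int :=
  (PySem.List.pyRange 1 (max_step + 1) 1).foldl
    (fun ids s =>
      match List.lookup s dec with
      | none => ids
      | some r => ids ++ [(List.lookup "top1_id" r).getD (-1)])
    []

-- ===== PORT B =====
-- '[int(r.get("top1_id", -1)) for s, r in sorted(dec.items(), key=lambda kv: kv[0]) if 1 <= s <= max_step]'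
def top1_ids_alt (dec : List (Int × List (String × Int))) (max_step : Int) : List Int :=
  ((PySem.List.sorted dec (fun kv => kv.1) false).filter
      (fun kv => decide (1 ≤ kv.1 ∧ kv.1 ≤ max_step))).map
    (fun kv => (List.lookup "top1_id" kv.2).getD (-1))

-- ===== PRECONDITION & SPEC =====
-- Pre_ requires the association list's keys to be distinct: a Python dict can never hold
-- duplicate keys, so this excludes no input the Python A is ever run on.
def Pre_top1_ids (dec : List (Int × List (String × Int))) (max_step : Int) : Prop :=
  (dec.map Prod.fst).Nodup
instance (dec : List (Int × List (String × Int))) (max_step : Int) : Decidable (Pre_top1_ids dec max_step) := by unfold Pre_top1_ids; infer_instance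
def pvWitness_top1_ids : (List (Int × List (String × Int))) × Int := ([(1, [("top1_id", 7)]), (3, [])], 3)
def Spec_top1_ids (dec : List (Int × List (String × Int))) (max_step : Int) (out : List Int) : Prop := out = top1_ids_alt dec max_step
instance (dec : List (Int × List (String × Int))) (max_step : Int) (out : List Int) : Decidable (Spec_top1_ids dec max_step out) := by unfold Spec_top1_ids; infer_instance

-- ===== CLAIM (what is proved, stated in full; the proofs are below) =====
def Claim_equal_top1_ids : Prop := ∀ (dec : List (Int × List (String × Int))) (max_step : Int), Dom_top1_ids dec max_step → Pre_top1_ids dec max_step → Spec_top1_ids dec max_step (top1_ids dec max_step)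

-- ===== LEMMAS AND PROOFS =====

-- the value extracted from one record
def pvVal (r : List (String × Int)) : Int := (List.lookup "top1_id" r).getD (-1)

-- what one step s of A's loop contributes
def pvStep (dec : List (Int × List (String × Int))) (s : Int) : List Int :=
  match List.lookup s dec with
  | none => []
  | some r => [pvVal r]

theorem pvLookup_of_mem {β : Type} {l : List (Int × β)} (h : (l.map Prod.fst).Nodup)
    {a : Int} {b : β} (hm : (a, b) ∈ l) : List.lookup a l = some b := by
  induction l with
  | nil => simp at hm
  | cons hd tl ih =>
    obtain ⟨k, v⟩ := hd
    simp only [List.map_cons, List.nodup_cons] at h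
    rcases List.mem_cons.mp hm with h1 | h1
    · rw [Prod.mk.injEq] at h1
      obtain ⟨rfl, rfl⟩ := h1
      simp
    · have hak : a ≠ k := by
        rintro rfl
        exact h.1 (List.mem_map.mpr ⟨(a, b), h1, rfl⟩)
      have hb : (a == k) = false := by simpa using hak
      simp [List.lookup_cons, hb, ih h.2 h1]

theorem pvMem_of_lookup {β : Type} {l : List (Int × β)} {a : Int} {b : β}
    (h : List.lookup a l = some b) : (a, b) ∈ l := by
  induction l with
  | nil => simp [List.lookup] at h
  | cons hd tl ih =>
    obtain ⟨k, v⟩ := hd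
    by_cases hak : a = k
    · subst hak
      simp at h
      simp [h]
    · have hb : (a == k) = false := by simpa using hak
      rw [List.lookup_cons] at h
      simp only [hb] at h
      exact List.mem_cons_of_mem _ (ih h)

theorem pvFoldl_eq_flatMap (dec : List (Int × List (String × Int))) (l : List Int) (acc : List Int) :
    l.foldl (fun ids s =>
      match List.lookup s dec with
      | none => ids
      | some r => ids ++ [(List.lookup "top1_id" r).getD (-1)]) acc
      = acc ++ l.flatMap (pvStep dec) := by
  induction l generalizing acc with
  | nil => simp
  | cons hd tl ih =>
    simp only [List.foldl_cons, List.flatMap_cons, ih]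
    cases h : List.lookup hd dec <;> simp [pvStep, pvVal, h]

theorem pvFlatMap_filter (dec : List (Int × List (String × Int))) (l : List Int) :
    l.flatMap (pvStep dec) =
      (l.filter (fun s => (List.lookup s dec).isSome)).flatMap (pvStep dec) := by
  induction l with
  | nil => rfl
  | cons hd tl ih =>
    by_cases h : (List.lookup hd dec).isSome
    · simp [h, ih]
    · simp only [Option.not_isSome_iff_eq_none] at h
      simp [h, ih, pvStep]

-- two strictly increasing lists with the same members are equal
theorem pvStrictSorted_ext {l1 l2 : List Int} (h1 : l1.Pairwise (· < ·))
    (h2 : l2.Pairwise (· < ·)) (hm : ∀ x, x ∈ l1 ↔ x ∈ l2) : l1 = l2 := by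
  induction l1 generalizing l2 with
  | nil =>
    cases l2 with
    | nil => rfl
    | cons b t2 => exact absurd ((hm b).mpr (List.mem_cons_self ..)) (by simp)
  | cons a t1 ih =>
    cases l2 with
    | nil => exact absurd ((hm a).mp (List.mem_cons_self ..)) (by simp)
    | cons b t2 =>
      simp only [List.pairwise_cons] at h1 h2
      have hab : a = b := by
        rcases List.mem_cons.mp ((hm a).mp (List.mem_cons_self ..)) with h | h
        · exact h
        · rcases List.mem_cons.mp ((hm b).mpr (List.mem_cons_self ..)) with h' | h'
          · exact h'.symm
          · exact absurd (lt_trans (h1.1 b h') (h2.1 a h)) (lt_irrefl a)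
      subst hab
      have ht : ∀ x, x ∈ t1 ↔ x ∈ t2 := by
        intro x
        constructor
        · intro hx
          rcases List.mem_cons.mp ((hm x).mp (List.mem_cons_of_mem _ hx)) with h | h
          · exact absurd (h ▸ h1.1 x hx) (lt_irrefl x)
          · exact h
        · intro hx
          rcases List.mem_cons.mp ((hm x).mpr (List.mem_cons_of_mem _ hx)) with h | h
          · exact absurd (h ▸ h2.1 x hx) (lt_irrefl x)
          · exact h
      exact congrArg _ (ih h1.2 h2.2 ht)

theorem pvKeys_eq (dec : List (Int × List (String × Int))) (max_step : Int)
    (hnd : (dec.map Prod.fst).Nodup) :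
    (PySem.List.pyRange 1 (max_step + 1) 1).filter (fun s => (List.lookup s dec).isSome)
      = ((PySem.List.sorted dec (fun kv => kv.1) false).filter
          (fun kv => decide (1 ≤ kv.1 ∧ kv.1 ≤ max_step))).map Prod.fst := by
  have hperm := PySem.List.sorted_perm dec (fun kv => kv.1) false
  apply pvStrictSorted_ext
  · exact (PySem.List.pairwise_lt_pyRange_one 1 (max_step + 1)).filter _
  · rw [List.pairwise_map]
    have hle : (PySem.List.sorted dec (fun kv => kv.1) false).Pairwise
        (fun a b => a.1 ≤ b.1) := PySem.List.sorted_pairwise dec (fun kv => kv.1)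
    have hndS : ((PySem.List.sorted dec (fun kv => kv.1) false).map Prod.fst).Nodup :=
      (hperm.map Prod.fst).nodup_iff.mpr hnd
    have hne : (PySem.List.sorted dec (fun kv => kv.1) false).Pairwise
        (fun a b => a.1 ≠ b.1) := List.pairwise_map.mp hndS
    exact ((hle.and hne).imp (fun h => lt_of_le_of_ne h.1 h.2)).filter _
  · intro x
    constructor
    · intro hx
      obtain ⟨hr, hs⟩ := List.mem_filter.mp hx
      obtain ⟨h1, h2⟩ := (PySem.List.mem_pyRange_one ..).mp hr
      obtain ⟨r, hlk⟩ := Option.isSome_iff_exists.mp hs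
      have hmem : (x, r) ∈ dec := pvMem_of_lookup hlk
      exact List.mem_map.mpr ⟨(x, r), List.mem_filter.mpr
        ⟨(PySem.List.mem_sorted ..).mpr hmem, by simp; omega⟩, rfl⟩
    · intro hx
      obtain ⟨⟨k, v⟩, hkv, rfl⟩ := List.mem_map.mp hx
      obtain ⟨hmemS, hcond⟩ := List.mem_filter.mp hkv
      have hmem : (k, v) ∈ dec := (PySem.List.mem_sorted ..).mp hmemS
      have hrange : 1 ≤ k ∧ k ≤ max_step := by simpa using hcond
      refine List.mem_filter.mpr ⟨(PySem.List.mem_pyRange_one ..).mpr ⟨hrange.1, by omega⟩, ?_⟩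
      simp [pvLookup_of_mem hnd hmem]

theorem pvFlatMap_keys (dec : List (Int × List (String × Int))) (max_step : Int)
    (hnd : (dec.map Prod.fst).Nodup) :
    (((PySem.List.sorted dec (fun kv => kv.1) false).filter
        (fun kv => decide (1 ≤ kv.1 ∧ kv.1 ≤ max_step))).map Prod.fst).flatMap (pvStep dec)
      = top1_ids_alt dec max_step := by
  unfold top1_ids_alt
  rw [List.flatMap_map]
  generalize hL : (PySem.List.sorted dec (fun kv => kv.1) false).filter
      (fun kv => decide (1 ≤ kv.1 ∧ kv.1 ≤ max_step)) = L
  have hsub : ∀ kv ∈ L, kv ∈ dec := by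
    intro kv hkv
    rw [← hL] at hkv
    exact (PySem.List.mem_sorted ..).mp (List.mem_filter.mp hkv).1
  clear hL
  induction L with
  | nil => rfl
  | cons hd tl ih =>
    have hmem : hd ∈ dec := hsub hd (List.mem_cons_self ..)
    have : pvStep dec hd.1 = [pvVal hd.2] := by
      simp [pvStep, pvLookup_of_mem hnd (by exact hmem)]
    simp only [List.flatMap_cons, List.map_cons, this, pvVal, List.singleton_append]
    exact congrArg _ (ih (fun kv hkv => hsub kv (List.mem_cons_of_mem _ hkv)))

-- ===== VERDICT (by name: the statement is the Claim_ definition above) =====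
theorem top1_ids_spec : Claim_equal_top1_ids := by
  intro dec max_step _ hpre
  unfold Spec_top1_ids top1_ids
  rw [pvFoldl_eq_flatMap, List.nil_append, pvFlatMap_filter, pvKeys_eq dec max_step hpre,
    pvFlatMap_keys dec max_step hpre]
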